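-- pv_equiv track=rewrite | github.com/mark-os/adventofcode2024 | 02/reporting.py | calculate_safe
-- ===== SOURCE A (Python) =====
-- def calculate_safe(number_list):
--     # safe contitions
--     # all increasing or all decreasing
--     # increment from 1 to 3
--     direction = ""
--     is_safe = True
--     for i, v in enumerate(number_list):
--         if i > 0:
--             diff = v - number_list[i-1]
--         else:
--             continue
--
--         if not (0 < abs(diff) <= 3):
--             is_safe = False
--             break
--
--         if diff > 0:  # increasing
--             if direction == "dec":
--                 is_safe = False
--                 break
--             direction = "inc"
--         elif diff < 0:  # decreasing
--             if direction == "inc":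
--                 is_safe = False
--                 break
--             direction = "dec"
--     return is_safe
-- ===== SOURCE B (Python) =====
-- def calculate_safe(number_list):
--     diffs = [b - a for a, b in zip(number_list, number_list[1:])]
--     return all(1 <= d <= 3 for d in diffs) or all(-3 <= d <= -1 for d in diffs)
-- ===== Notes on version B (the rewrite author's own statement) =====
-- stated objective: idiomatic
-- what changed: B builds the list of consecutive differences once and checks that all of them lie in one step range (all between 1 and 3, or all between -3 and -1), replacing A's stateful scan with a direction flag and early breaks.
import Mathlib
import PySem

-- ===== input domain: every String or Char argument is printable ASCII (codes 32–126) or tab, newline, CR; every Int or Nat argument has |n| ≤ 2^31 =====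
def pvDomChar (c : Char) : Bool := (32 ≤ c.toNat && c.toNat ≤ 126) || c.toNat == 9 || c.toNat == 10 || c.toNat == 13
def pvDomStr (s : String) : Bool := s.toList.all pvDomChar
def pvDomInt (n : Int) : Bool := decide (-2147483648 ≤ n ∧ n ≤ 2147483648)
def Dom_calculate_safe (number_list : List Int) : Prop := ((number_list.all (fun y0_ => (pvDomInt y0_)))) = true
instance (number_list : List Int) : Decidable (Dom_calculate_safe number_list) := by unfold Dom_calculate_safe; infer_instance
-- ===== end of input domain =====

-- B replaces A's stateful direction-flag scan by a derived differences list checked with two uniform all-passes (idiomatic; same return value).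
-- ===== PORT A =====
-- loop of A: state = (previous element, direction string); breaking returns false
def calcSafeGo (prev : Int) (rest : List Int) (dir : String) : Bool :=
  match rest with
  | [] => true
  | v :: t =>
    let diff := v - prev
    if ¬ (0 < |diff| ∧ |diff| ≤ 3) then false
    else if diff > 0 then
      if dir = "dec" then false else calcSafeGo v t "inc"
    else if diff < 0 then
      if dir = "inc" then false else calcSafeGo v t "dec"
    else calcSafeGo v t dir

def calculate_safe (number_list : List Int) : Bool :=
  match number_list with
  | [] => true
  | h :: t => calcSafeGo h t ""

-- ===== PORT B =====
def calculate_safe_alt (number_list : List Int) : Bool :=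
  let diffs := (List.zip number_list (number_list.drop 1)).map (fun p => p.2 - p.1)
  diffs.all (fun d => decide (1 ≤ d) && decide (d ≤ 3)) ||
  diffs.all (fun d => decide (-3 ≤ d) && decide (d ≤ -1))

-- ===== PRECONDITION & SPEC =====
def Spec_calculate_safe (number_list : List Int) (out : Bool) : Prop := out = calculate_safe_alt number_list
instance (number_list : List Int) (out : Bool) : Decidable (Spec_calculate_safe number_list out) := by unfold Spec_calculate_safe; infer_instance

-- ===== CLAIM (what is proved, stated in full; the proofs are below) =====
def Claim_equal_calculate_safe : Prop := ∀ (number_list : List Int), Dom_calculate_safe number_list → Spec_calculate_safe number_list (calculate_safe number_list)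

-- ===== LEMMAS AND PROOFS =====

def diffsOf (prev : Int) (rest : List Int) : List Int :=
  (List.zip (prev :: rest) rest).map (fun p => p.2 - p.1)

theorem diffsOf_cons (prev v : Int) (t : List Int) :
    diffsOf prev (v :: t) = (v - prev) :: diffsOf v t := by
  simp [diffsOf]

theorem calcSafeGo_char (rest : List Int) : ∀ prev : Int,
    calcSafeGo prev rest "inc" = (diffsOf prev rest).all (fun d => decide (1 ≤ d) && decide (d ≤ 3)) ∧
    calcSafeGo prev rest "dec" = (diffsOf prev rest).all (fun d => decide (-3 ≤ d) && decide (d ≤ -1)) ∧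
    calcSafeGo prev rest "" =
      ((diffsOf prev rest).all (fun d => decide (1 ≤ d) && decide (d ≤ 3)) ||
       (diffsOf prev rest).all (fun d => decide (-3 ≤ d) && decide (d ≤ -1))) := by
  induction rest with
  | nil => intro prev; simp [calcSafeGo, diffsOf]
  | cons v t ih =>
    intro prev
    obtain ⟨hinc, hdec, hnone⟩ := ih v
    by_cases hbad : ¬ (0 < |v - prev| ∧ |v - prev| ≤ 3)
    · have hf : ¬ (1 ≤ v - prev ∧ v - prev ≤ 3) ∧ ¬ (-3 ≤ v - prev ∧ v - prev ≤ -1) := by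
        rcases abs_cases (v - prev) with ⟨h, _⟩ | ⟨h, _⟩ <;> rw [h] at hbad <;>
          exact ⟨by omega, by omega⟩
      have e1 : (decide (1 ≤ v - prev) && decide (v - prev ≤ 3)) = false := by
        simp only [Bool.and_eq_false_iff, decide_eq_false_iff_not]; omega
      have e2 : (decide (-3 ≤ v - prev) && decide (v - prev ≤ -1)) = false := by
        simp only [Bool.and_eq_false_iff, decide_eq_false_iff_not]; omega
      refine ⟨?_, ?_, ?_⟩ <;> simp only [calcSafeGo] <;> rw [if_pos hbad] <;>
        simp only [diffsOf_cons, List.all_cons, e1, e2, Bool.false_and, Bool.false_or]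
    · rw [not_not] at hbad
      by_cases hpos : v - prev > 0
      · have hin : 1 ≤ v - prev ∧ v - prev ≤ 3 := by
          rcases abs_cases (v - prev) with ⟨h, _⟩ | ⟨h, _⟩ <;> rw [h] at hbad <;> omega
        have e1 : (decide (1 ≤ v - prev) && decide (v - prev ≤ 3)) = true := by
          simp only [Bool.and_eq_true, decide_eq_true_eq]; omega
        have e2 : (decide (-3 ≤ v - prev) && decide (v - prev ≤ -1)) = false := by
          simp only [Bool.and_eq_false_iff, decide_eq_false_iff_not]; omega
        refine ⟨?_, ?_, ?_⟩ <;> simp only [calcSafeGo] <;>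
          rw [if_neg (not_not_intro hbad), if_pos hpos]
        · rw [if_neg (by decide : ¬ ("inc" : String) = "dec")]
          simp only [hinc, diffsOf_cons, List.all_cons, e1, Bool.true_and]
        · simp only [reduceIte, diffsOf_cons, List.all_cons, e2, Bool.false_and]
        · rw [if_neg (by decide : ¬ ("" : String) = "dec")]
          simp only [hinc, diffsOf_cons, List.all_cons, e1, e2, Bool.true_and,
            Bool.false_and, Bool.or_false]
      · have hneg : v - prev < 0 := by
          rcases abs_cases (v - prev) with ⟨h, _⟩ | ⟨h, _⟩ <;> rw [h] at hbad <;> omega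
        have hin : -3 ≤ v - prev ∧ v - prev ≤ -1 := by
          rcases abs_cases (v - prev) with ⟨h, _⟩ | ⟨h, _⟩ <;> rw [h] at hbad <;> omega
        have e1 : (decide (1 ≤ v - prev) && decide (v - prev ≤ 3)) = false := by
          simp only [Bool.and_eq_false_iff, decide_eq_false_iff_not]; omega
        have e2 : (decide (-3 ≤ v - prev) && decide (v - prev ≤ -1)) = true := by
          simp only [Bool.and_eq_true, decide_eq_true_eq]; omega
        refine ⟨?_, ?_, ?_⟩ <;> simp only [calcSafeGo] <;>
          rw [if_neg (not_not_intro hbad), if_neg hpos, if_pos hneg]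
        · simp only [reduceIte, diffsOf_cons, List.all_cons, e1, Bool.false_and]
        · rw [if_neg (by decide : ¬ ("dec" : String) = "inc")]
          simp only [hdec, diffsOf_cons, List.all_cons, e2, Bool.true_and]
        · rw [if_neg (by decide : ¬ ("" : String) = "inc")]
          simp only [hdec, diffsOf_cons, List.all_cons, e1, e2, Bool.true_and,
            Bool.false_and, Bool.false_or]

-- ===== VERDICT =====
theorem calculate_safe_spec : Claim_equal_calculate_safe := by
  intro l _
  unfold Spec_calculate_safe calculate_safe calculate_safe_alt
  cases l with
  | nil => simp
  | cons h t =>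
    have := (calcSafeGo_char t h).2.2
    simpa [diffsOf] using this
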